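-- pv_equiv track=rewrite | github.com/LBNL-UCB-STI/beam | src/main/python/compare_simulation_logs/compare_runs.py | replace_all_digits
-- ===== SOURCE A (Python) =====
-- def replace_all_digits(log):
--     digit_has_been_met = False
--     result = ""
--     for x in log:
--         if x.isdigit():
--             if not digit_has_been_met:
--                 digit_has_been_met = True
--                 result += 'X'
--             else:
--                 continue
--         else:
--             if digit_has_been_met:
--                 digit_has_been_met = False
--             result += x
--     return result
-- ===== SOURCE B (Python) =====
-- from itertools import groupby
--
-- def replace_all_digits(log):
--     return ''.join('X' if is_digit else ''.join(run)
--                    for is_digit, run in groupby(log, key=str.isdigit))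
-- ===== Notes on version B (the rewrite author's own statement) =====
-- stated objective: idiomatic
-- what changed: Replaces the explicit digit_has_been_met flag loop with itertools.groupby over str.isdigit runs, emitting one placeholder character per digit run and each non-digit run verbatim.
import Mathlib
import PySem

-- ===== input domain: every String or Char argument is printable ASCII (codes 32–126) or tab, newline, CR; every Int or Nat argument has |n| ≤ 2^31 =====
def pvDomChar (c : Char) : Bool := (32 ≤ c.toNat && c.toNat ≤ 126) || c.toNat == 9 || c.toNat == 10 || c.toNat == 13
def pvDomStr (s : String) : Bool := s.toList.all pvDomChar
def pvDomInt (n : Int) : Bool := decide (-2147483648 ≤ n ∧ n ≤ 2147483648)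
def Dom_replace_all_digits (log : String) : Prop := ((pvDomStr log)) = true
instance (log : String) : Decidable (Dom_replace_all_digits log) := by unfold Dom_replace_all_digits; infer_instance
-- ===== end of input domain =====

-- B rewrites A's flag-carrying loop as run-grouping (groupby on isdigit); return values proved equal on all of Dom.

-- ===== PORT A =====
-- A: one pass with a digit_has_been_met flag, appending to result.
def replace_all_digits (log : String) : String :=
  let st := log.toList.foldl
    (fun (st : Bool × List Char) x =>
      if PySem.Chars.isdigit x then
        if st.1 = false then (true, st.2 ++ ['X']) else st
      else
        (false, st.2 ++ [x]))
    (false, [])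
  String.ofList st.2

-- ===== PORT B =====
-- takeRun k xs: longest prefix of xs whose chars have isdigit = k, and the rest (groupby's group split)
def pvTakeRun (k : Bool) : List Char → List Char × List Char
  | [] => ([], [])
  | x :: xs =>
    if PySem.Chars.isdigit x = k then
      let p := pvTakeRun k xs
      (x :: p.1, p.2)
    else ([], x :: xs)

theorem pvTakeRun_rest_len (k : Bool) (xs : List Char) :
    (pvTakeRun k xs).2.length ≤ xs.length := by
  induction xs with
  | nil => simp [pvTakeRun]
  | cons x xs ih =>
    simp only [pvTakeRun]
    split
    · simpa using Nat.le_succ_of_le ih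
    · simp

-- groupby(log, key=isdigit): list of (key, run) pairs, maximal runs of equal key
def pvGroups : List Char → List (Bool × List Char)
  | [] => []
  | x :: xs =>
    (PySem.Chars.isdigit x, x :: (pvTakeRun (PySem.Chars.isdigit x) xs).1) ::
      pvGroups (pvTakeRun (PySem.Chars.isdigit x) xs).2
termination_by l => l.length
decreasing_by
  simp only [List.length_cons]
  exact Nat.lt_succ_of_le (pvTakeRun_rest_len _ _)

def replace_all_digits_alt (log : String) : String :=
  String.ofList ((pvGroups log.toList).flatMap (fun g => if g.1 then ['X'] else g.2))

-- ===== PRECONDITION & SPEC =====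
def Spec_replace_all_digits (log : String) (out : String) : Prop := out = replace_all_digits_alt log
instance (log : String) (out : String) : Decidable (Spec_replace_all_digits log out) := by unfold Spec_replace_all_digits; infer_instance

-- ===== CLAIM (what is proved, stated in full; the proofs are below) =====
def Claim_equal_replace_all_digits : Prop := ∀ (log : String), Dom_replace_all_digits log → Spec_replace_all_digits log (replace_all_digits log)

-- ===== LEMMAS AND PROOFS =====

-- simple recursive reference: what the flag loop emits from flag state b
def pvEmit (b : Bool) : List Char → List Char
  | [] => []
  | x :: xs =>
    if PySem.Chars.isdigit x then
      if b then pvEmit true xs else 'X' :: pvEmit true xs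
    else x :: pvEmit false xs

-- A's foldl appends pvEmit of the current flag
theorem foldl_emit (l : List Char) (b : Bool) (acc : List Char) :
    (l.foldl
      (fun (st : Bool × List Char) x =>
        if PySem.Chars.isdigit x then
          if st.1 = false then (true, st.2 ++ ['X']) else st
        else
          (false, st.2 ++ [x]))
      (b, acc)).2 = acc ++ pvEmit b l := by
  induction l generalizing b acc with
  | nil => simp [pvEmit]
  | cons x xs ih =>
    simp only [List.foldl, pvEmit]
    by_cases hd : PySem.Chars.isdigit x
    · cases b <;> simp [hd, ih]
    · simp [hd, ih]

theorem pvEmit_true_run (r rest : List Char)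
    (hr : ∀ c ∈ r, PySem.Chars.isdigit c = true)
    (hrest : rest = [] ∨ ∃ y ys, rest = y :: ys ∧ PySem.Chars.isdigit y = false) :
    pvEmit true (r ++ rest) = pvEmit false rest := by
  induction r with
  | nil =>
    rcases hrest with h | ⟨y, ys, h, hy⟩
    · simp [h, pvEmit]
    · simp [h, pvEmit, hy]
  | cons c cs ih =>
    have hc := hr c (by simp)
    simp only [List.cons_append, pvEmit, hc, if_pos]
    exact ih (fun d hd => hr d (by simp [hd]))

theorem pvEmit_false_run (r rest : List Char)
    (hr : ∀ c ∈ r, PySem.Chars.isdigit c = false) :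
    pvEmit false (r ++ rest) = r ++ pvEmit false rest := by
  induction r with
  | nil => simp
  | cons c cs ih =>
    have hc := hr c (by simp)
    simp only [List.cons_append, pvEmit, hc]
    simp [ih (fun d hd => hr d (by simp [hd]))]

theorem pvTakeRun_split (k : Bool) (xs : List Char) :
    xs = (pvTakeRun k xs).1 ++ (pvTakeRun k xs).2 := by
  induction xs with
  | nil => simp [pvTakeRun]
  | cons x xs ih =>
    simp only [pvTakeRun]
    split
    · simpa using ih
    · simp

theorem pvTakeRun_run_key (k : Bool) (xs : List Char) :
    ∀ c ∈ (pvTakeRun k xs).1, PySem.Chars.isdigit c = k := by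
  induction xs with
  | nil => simp [pvTakeRun]
  | cons x xs ih =>
    simp only [pvTakeRun]
    split
    · next h =>
        intro c hc
        simp only [List.mem_cons] at hc
        rcases hc with rfl | hc
        · exact h
        · exact ih c hc
    · simp

theorem pvTakeRun_rest_key (k : Bool) (xs : List Char) :
    (pvTakeRun k xs).2 = [] ∨
      ∃ y ys, (pvTakeRun k xs).2 = y :: ys ∧ PySem.Chars.isdigit y ≠ k := by
  induction xs with
  | nil => simp [pvTakeRun]
  | cons x xs ih =>
    simp only [pvTakeRun]
    split
    · simpa using ih
    · next h => exact Or.inr ⟨x, xs, rfl, h⟩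

-- main: the group flatten equals the flag recursion from flag false
theorem groups_emit (l : List Char) :
    (pvGroups l).flatMap (fun g => if g.1 then ['X'] else g.2) = pvEmit false l := by
  induction l using pvGroups.induct with
  | case1 => simp [pvGroups, pvEmit]
  | case2 x xs ih =>
    rw [pvGroups]
    simp only [List.flatMap_cons]
    have hsplit := pvTakeRun_split (PySem.Chars.isdigit x) xs
    have hrun := pvTakeRun_run_key (PySem.Chars.isdigit x) xs
    have hrest := pvTakeRun_rest_key (PySem.Chars.isdigit x) xs
    set r := (pvTakeRun (PySem.Chars.isdigit x) xs).1 with hr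
    set rest := (pvTakeRun (PySem.Chars.isdigit x) xs).2 with hre
    rw [show pvEmit false (x :: xs) = if PySem.Chars.isdigit x then 'X' :: pvEmit true xs
          else x :: pvEmit false xs by by_cases h : PySem.Chars.isdigit x <;> simp [pvEmit, h]]
    by_cases hd : PySem.Chars.isdigit x
    · rw [hd] at hrun hrest
      simp only [hd, if_true, ih, hsplit]
      rw [pvEmit_true_run r rest hrun ?side]
      case side =>
        rcases hrest with h | ⟨y, ys, h, hy⟩
        · exact Or.inl h
        · exact Or.inr ⟨y, ys, h, by simpa using hy⟩
      simp
    · have hdf : PySem.Chars.isdigit x = false := by simpa using hd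
      rw [hdf] at hrun
      simp only [hdf, Bool.false_eq_true, if_false, ih, hsplit]
      rw [pvEmit_false_run r rest hrun]
      simp

-- ===== VERDICT (by name: the statement is the Claim_ definition above) =====
theorem replace_all_digits_spec : Claim_equal_replace_all_digits := by
  intro log _
  unfold Spec_replace_all_digits replace_all_digits replace_all_digits_alt
  rw [groups_emit]
  simp [foldl_emit]
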